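-- pv_equiv track=rewrite | github.com/raja9112/Python | Greedy Algorithm/Job Scheduling.py | job_scheduling_with_profit
-- ===== SOURCE A (Python) =====
-- def job_scheduling_with_profit(jobs):
--     # Sort jobs based on their profit in descending order
--     jobs.sort(key = lambda x: x[2], reverse = True)
--     # Initialize schedule, count of jobs scheduled, and total profit
--     schedule = []
--     count = 0
--     total_profit = 0
--
--     # Greedy scheduling considering deadlines
--     for job in jobs:
--         deadline = job[1]
--         profit = job[2]
--         # Find available time slot before deadline
--         for i in range(deadline, 0, -1):
--             if i not in schedule:
--                 schedule.append(i)
--                 count += 1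
--                 total_profit += profit
--                 break
--
--     return count, total_profit, schedule
-- ===== SOURCE B (Python) =====
-- def job_scheduling_with_profit(jobs):
--     # Union-find over time slots: after sorting by profit (desc, stable), find(d)
--     # returns the latest free slot <= d (a value <= 0 means no free slot).
--     # Like A, this sorts `jobs` in place; the equivalence is about the return value.
--     jobs.sort(key=lambda x: x[2], reverse=True)
--     parent = {}
--     schedule = []
--     total_profit = 0
--     for job in jobs:
--         # find the root (latest free slot <= deadline)
--         root = job[1]
--         while root in parent:
--             root = parent[root]
--         # path compression: point everything on the path straight at the root
--         s = job[1]
--         while s in parent: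
--             nxt = parent[s]
--             parent[s] = root
--             s = nxt
--         if root > 0:
--             schedule.append(root)
--             total_profit += job[2]
--             parent[root] = root - 1
--     return len(schedule), total_profit, schedule
-- ===== Notes on version B (the rewrite author's own statement) =====
-- stated objective: faster
-- what changed: Replaced the per-job downward scan with list membership (find first i in range(deadline,0,-1) not in schedule) by a union-find over time slots with path compression that returns the latest free slot <= deadline in near-constant amortized time.
import Mathlib
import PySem

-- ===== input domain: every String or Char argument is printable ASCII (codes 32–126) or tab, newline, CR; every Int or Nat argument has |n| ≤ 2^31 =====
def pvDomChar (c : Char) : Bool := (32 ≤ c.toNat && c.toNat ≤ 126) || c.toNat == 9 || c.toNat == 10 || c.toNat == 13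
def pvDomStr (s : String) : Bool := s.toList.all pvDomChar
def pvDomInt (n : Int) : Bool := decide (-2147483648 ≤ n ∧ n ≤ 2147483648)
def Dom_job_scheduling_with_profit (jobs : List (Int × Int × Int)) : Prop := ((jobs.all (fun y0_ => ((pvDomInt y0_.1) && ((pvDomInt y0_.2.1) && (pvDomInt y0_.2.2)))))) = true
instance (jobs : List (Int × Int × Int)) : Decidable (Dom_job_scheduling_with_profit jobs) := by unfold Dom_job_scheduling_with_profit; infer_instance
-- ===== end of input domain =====

-- B replaces A's per-job downward slot scan with list membership by a union-find over
-- time slots with path compression (measured faster); like A, B's Python sorts `jobs`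
-- in place — the equivalence proved here is about the return value.


-- ===== PORT A =====
-- inner loop `for i in range(deadline, 0, -1): if i not in schedule: … break`,
-- ported as the lazy countdown Python's range iterates: first free i, none if the loop ends
def pvFindSlotA (schedule : List Int) (i : Int) : Option Int :=
  if h : i ≤ 0 then none
  else if schedule.contains i then pvFindSlotA schedule (i - 1) else some i
termination_by i.toNat
decreasing_by omega

-- the body of A's `for job in jobs` loop over the state (schedule, count, total_profit)
def pvStepA (st : List Int × Int × Int) (job : Int × Int × Int) : List Int × Int × Int :=
  let (schedule, count, total_profit) := st
  match pvFindSlotA schedule job.2.1 with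
  | some i => (schedule ++ [i], count + 1, total_profit + job.2.2)
  | none => (schedule, count, total_profit)

def job_scheduling_with_profit (jobs : List (Int × Int × Int)) : Int × Int × List Int :=
  let sortedJobs := PySem.List.sorted jobs (fun x => x.2.2) true
  let st := sortedJobs.foldl pvStepA ([], 0, 0)
  (st.2.1, st.2.2, st.1)

-- ===== PORT B =====
-- `root = job[1]; while root in parent: root = parent[root]` (the fuel is only a
-- totality guard: on every dict B builds, stored links point strictly downward from
-- keys ≥ 1, so the walk takes at most job[1] steps)
def pvChase (parent : PySem.Dict Int Int) (root : Int) (fuel : Nat) : Int :=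
  match fuel with
  | 0 => root
  | fuel + 1 =>
    match parent.get? root with
    | none => root
    | some p => pvChase parent p fuel

-- `s = job[1]; while s in parent: nxt = parent[s]; parent[s] = root; s = nxt` (same fuel guard)
def pvCompress (parent : PySem.Dict Int Int) (s root : Int) (fuel : Nat) : PySem.Dict Int Int :=
  match fuel with
  | 0 => parent
  | fuel + 1 =>
    match parent.get? s with
    | none => parent
    | some nxt => pvCompress (parent.insert s root) nxt root fuel

-- the body of B's `for job in jobs` loop over the state (parent, schedule, total_profit)
def pvStepB (st : PySem.Dict Int Int × List Int × Int) (job : Int × Int × Int) :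
    PySem.Dict Int Int × List Int × Int :=
  let (parent, schedule, total_profit) := st
  let root := pvChase parent job.2.1 (job.2.1.toNat + 1)
  let parent := pvCompress parent job.2.1 root (job.2.1.toNat + 1)
  if root > 0 then
    (parent.insert root (root - 1), schedule ++ [root], total_profit + job.2.2)
  else (parent, schedule, total_profit)

def job_scheduling_with_profit_alt (jobs : List (Int × Int × Int)) : Int × Int × List Int :=
  let sortedJobs := PySem.List.sorted jobs (fun x => x.2.2) true
  let st := sortedJobs.foldl pvStepB (PySem.Dict.empty, [], 0)
  ((st.2.1.length : Int), st.2.2, st.2.1)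

-- ===== PRECONDITION & SPEC =====
def Spec_job_scheduling_with_profit (jobs : List (Int × Int × Int)) (out : Int × Int × List Int) : Prop := out = job_scheduling_with_profit_alt jobs
instance (jobs : List (Int × Int × Int)) (out : Int × Int × List Int) : Decidable (Spec_job_scheduling_with_profit jobs out) := by unfold Spec_job_scheduling_with_profit; infer_instance

-- ===== CLAIM (what is proved, stated in full; the proofs are below) =====
def Claim_equal_job_scheduling_with_profit : Prop := ∀ (jobs : List (Int × Int × Int)), Dom_job_scheduling_with_profit jobs → Spec_job_scheduling_with_profit jobs (job_scheduling_with_profit jobs)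

-- ===== LEMMAS AND PROOFS =====

-- the latest free slot ≤ d w.r.t. the used-slot list u (a value ≤ 0 means no free slot)
def pvMaxFree (u : List Int) (d : Int) : Int :=
  if h : d ≤ 0 then d
  else if u.contains d then pvMaxFree u (d - 1) else d
termination_by d.toNat
decreasing_by omega

theorem pvMaxFree_le (u : List Int) (d : Int) : pvMaxFree u d ≤ d := by
  fun_induction pvMaxFree u d with
  | case1 => omega
  | case2 d h hc ih => omega
  | case3 => omega

theorem pvMaxFree_free (u : List Int) (d : Int) (h : 0 < pvMaxFree u d) :
    u.contains (pvMaxFree u d) = false := by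
  fun_induction pvMaxFree u d with
  | case1 d hd => omega
  | case2 d h hc ih => exact ih ‹_›
  | case3 d hd hc => simpa using hc

theorem pvMaxFree_nonpos (u : List Int) (d : Int) (hd : d ≤ 0) : pvMaxFree u d = d := by
  conv_lhs => rw [pvMaxFree]
  simp [hd]

theorem pvMaxFree_used (u : List Int) (d : Int) (hd : ¬ d ≤ 0) (hc : u.contains d = true) :
    pvMaxFree u d = pvMaxFree u (d - 1) := by
  conv_lhs => rw [pvMaxFree]
  rw [dif_neg hd, if_pos hc]

theorem pvMaxFree_of_free (u : List Int) (d : Int) (hd : ¬ d ≤ 0) (hc : u.contains d = false) :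
    pvMaxFree u d = d := by
  conv_lhs => rw [pvMaxFree]
  rw [dif_neg hd, if_neg (by simpa using hc)]

theorem pvMaxFree_idem (u : List Int) (d : Int) :
    pvMaxFree u (pvMaxFree u d) = pvMaxFree u d := by
  by_cases h : pvMaxFree u d ≤ 0
  · rw [pvMaxFree]; simp [h]
  · rw [pvMaxFree, dif_neg h, pvMaxFree_free u d (by omega)]; simp

theorem pvFindSlotA_eq (u : List Int) (d : Int) :
    pvFindSlotA u d = if 0 < pvMaxFree u d then some (pvMaxFree u d) else none := by
  fun_induction pvFindSlotA u d with
  | case1 d hd => rw [pvMaxFree_nonpos u d hd, if_neg (by omega)]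
  | case2 d hd hc ih => rw [pvMaxFree_used u d hd hc]; exact ih
  | case3 d hd hc =>
    rw [pvMaxFree_of_free u d hd (by simpa using hc), if_pos (by omega)]

theorem pvContains_append (u : List Int) (slot d : Int) :
    (u ++ [slot]).contains d = (u.contains d || d == slot) := by
  by_cases h : d = slot <;> by_cases h2 : d ∈ u <;>
    simp [h, h2]

theorem pvMaxFree_append (u : List Int) (slot : Int) (hpos : 0 < slot)
    (hfree : u.contains slot = false) (d : Int) :
    pvMaxFree (u ++ [slot]) d =
      if pvMaxFree u d = slot then pvMaxFree u (slot - 1) else pvMaxFree u d := by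
  have H : ∀ (n : Nat) (d : Int), d.toNat ≤ n →
      pvMaxFree (u ++ [slot]) d =
        if pvMaxFree u d = slot then pvMaxFree u (slot - 1) else pvMaxFree u d := by
    intro n
    induction n with
    | zero =>
      intro d hdn
      have hd : d ≤ 0 := by omega
      rw [pvMaxFree_nonpos u d hd, pvMaxFree_nonpos (u ++ [slot]) d hd, if_neg (by omega)]
    | succ n ih =>
      intro d hdn
      by_cases hd : d ≤ 0
      · rw [pvMaxFree_nonpos u d hd, pvMaxFree_nonpos (u ++ [slot]) d hd, if_neg (by omega)]
      · by_cases hc : u.contains d = true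
        · rw [pvMaxFree_used u d hd hc,
              pvMaxFree_used (u ++ [slot]) d hd (by rw [pvContains_append, hc]; rfl)]
          exact ih (d - 1) (by omega)
        · have hc' : u.contains d = false := by simpa using hc
          by_cases hds : d = slot
          · subst hds
            rw [pvMaxFree_used (u ++ [d]) d hd (by rw [pvContains_append, hc']; simp),
                pvMaxFree_of_free u d hd hc', if_pos rfl,
                ih (d - 1) (by omega),
                if_neg (by have := pvMaxFree_le u (d - 1); omega)]
          · rw [pvMaxFree_of_free (u ++ [slot]) d hd
                  (by rw [pvContains_append, hc']; simp [hds]),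
                pvMaxFree_of_free u d hd hc', if_neg hds]
  exact H d.toNat d le_rfl

-- the union-find invariant: keys = used slots; every stored link points strictly
-- downward from a slot ≥ 1 and does not change the latest-free-slot value
def pvInv (parent : PySem.Dict Int Int) (u : List Int) : Prop :=
  (∀ k : Int, (parent.get? k).isSome = u.contains k) ∧
  (∀ k v : Int, parent.get? k = some v → v < k ∧ 1 ≤ k ∧ pvMaxFree u v = pvMaxFree u k)

theorem pvChase_eq (parent : PySem.Dict Int Int) (u : List Int) (hinv : pvInv parent u) :
    ∀ (fuel : Nat) (r : Int), r.toNat < fuel → pvChase parent r fuel = pvMaxFree u r := by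
  intro fuel
  induction fuel with
  | zero => intro r hr; omega
  | succ n ih =>
    intro r hr
    rw [pvChase]
    cases hg : parent.get? r with
    | none =>
      change r = pvMaxFree u r
      have hc : u.contains r = false := by
        have := hinv.1 r; rw [hg] at this; simpa using this.symm
      by_cases hr0 : r ≤ 0
      · exact (pvMaxFree_nonpos u r hr0).symm
      · exact (pvMaxFree_of_free u r hr0 hc).symm
    | some v =>
      change pvChase parent v n = pvMaxFree u r
      obtain ⟨hvr, hr1, hmf⟩ := hinv.2 r v hg
      rw [ih v (by omega), hmf]

theorem pvCompress_inv (u : List Int) :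
    ∀ (fuel : Nat) (parent : PySem.Dict Int Int) (s root : Int), pvInv parent u →
      root = pvMaxFree u s → pvInv (pvCompress parent s root fuel) u := by
  intro fuel
  induction fuel with
  | zero => intro parent s root hinv _; exact hinv
  | succ n ih =>
    intro parent s root hinv hroot
    rw [pvCompress]
    cases hg : parent.get? s with
    | none => exact hinv
    | some nxt =>
      change pvInv (pvCompress (parent.insert s root) nxt root n) u
      obtain ⟨hvs, hs1, hmf⟩ := hinv.2 s nxt hg
      have hsu : u.contains s = true := by
        have := hinv.1 s; rw [hg] at this; simpa using this.symm
      -- the overwritten link s ↦ root still satisfies the invariant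
      have hrs : root < s := by
        have : pvMaxFree u s = pvMaxFree u (s - 1) :=
          pvMaxFree_used u s (by omega) hsu
        have := pvMaxFree_le u (s - 1)
        omega
      have hinv' : pvInv (parent.insert s root) u := by
        constructor
        · intro k
          rw [PySem.Dict.get?_insert]
          split
          · next hk => subst hk; simpa using hsu.symm
          · exact hinv.1 k
        · intro k v hkv
          rw [PySem.Dict.get?_insert] at hkv
          split at hkv
          · next hk =>
            cases hkv
            subst hk
            refine ⟨hrs, hs1, ?_⟩
            rw [hroot, pvMaxFree_idem]
          · exact hinv.2 k v hkv
      exact ih (parent.insert s root) nxt root hinv' (by rw [hroot, hmf])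

theorem pvInsert_inv (parent : PySem.Dict Int Int) (u : List Int) (slot : Int)
    (hinv : pvInv parent u) (hpos : 0 < slot) (hfree : u.contains slot = false) :
    pvInv (parent.insert slot (slot - 1)) (u ++ [slot]) := by
  constructor
  · intro k
    rw [PySem.Dict.get?_insert, pvContains_append]
    split
    · next hk => subst hk; simp
    · next hk =>
      rw [hinv.1 k]
      have : (k == slot) = false := by simpa using hk
      rw [this, Bool.or_false]
  · intro k v hkv
    rw [PySem.Dict.get?_insert] at hkv
    split at hkv
    · next hk =>
      cases hkv
      subst hk
      refine ⟨by omega, by omega, ?_⟩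
      rw [pvMaxFree_used (u ++ [k]) k (by omega)
            (by rw [pvContains_append, hfree]; simp)]
    · next hk =>
      obtain ⟨hvk, hk1, hmf⟩ := hinv.2 k v hkv
      refine ⟨hvk, hk1, ?_⟩
      rw [pvMaxFree_append u slot hpos hfree v, pvMaxFree_append u slot hpos hfree k, hmf]

theorem pvLoop : ∀ (js : List (Int × Int × Int)) (sched : List Int) (total : Int)
    (parent : PySem.Dict Int Int), pvInv parent sched →
    (js.foldl pvStepA (sched, (sched.length : Int), total)).1
        = (js.foldl pvStepB (parent, sched, total)).2.1 ∧
    (js.foldl pvStepA (sched, (sched.length : Int), total)).2.1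
        = ((js.foldl pvStepB (parent, sched, total)).2.1.length : Int) ∧
    (js.foldl pvStepA (sched, (sched.length : Int), total)).2.2
        = (js.foldl pvStepB (parent, sched, total)).2.2 ∧
    pvInv (js.foldl pvStepB (parent, sched, total)).1
      (js.foldl pvStepB (parent, sched, total)).2.1 := by
  intro js
  induction js with
  | nil => intro sched total parent hinv; exact ⟨rfl, rfl, rfl, hinv⟩
  | cons job js ih =>
    intro sched total parent hinv
    simp only [List.foldl_cons]
    have hchase : pvChase parent job.2.1 (job.2.1.toNat + 1) = pvMaxFree sched job.2.1 :=
      pvChase_eq parent sched hinv (job.2.1.toNat + 1) job.2.1 (by omega)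
    have hinv2 : pvInv (pvCompress parent job.2.1
        (pvChase parent job.2.1 (job.2.1.toNat + 1)) (job.2.1.toNat + 1)) sched :=
      pvCompress_inv sched (job.2.1.toNat + 1) parent job.2.1 _ hinv hchase
    by_cases hm : 0 < pvMaxFree sched job.2.1
    · have hA : pvStepA (sched, (sched.length : Int), total) job
          = (sched ++ [pvMaxFree sched job.2.1], (sched.length : Int) + 1,
             total + job.2.2) := by
        simp only [pvStepA, pvFindSlotA_eq, if_pos hm]
      have hB : pvStepB (parent, sched, total) job
          = ((pvCompress parent job.2.1 (pvChase parent job.2.1 (job.2.1.toNat + 1))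
                (job.2.1.toNat + 1)).insert (pvMaxFree sched job.2.1)
                (pvMaxFree sched job.2.1 - 1),
             sched ++ [pvMaxFree sched job.2.1], total + job.2.2) := by
        simp only [pvStepB, hchase, if_pos hm]
      rw [hA, hB]
      have hlen : ((sched.length : Int) + 1)
          = ((sched ++ [pvMaxFree sched job.2.1]).length : Int) := by simp
      rw [hlen]
      exact ih (sched ++ [pvMaxFree sched job.2.1]) (total + job.2.2) _
        (pvInsert_inv _ sched (pvMaxFree sched job.2.1) hinv2 hm
          (pvMaxFree_free sched job.2.1 hm))
    · have hA : pvStepA (sched, (sched.length : Int), total) job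
          = (sched, (sched.length : Int), total) := by
        simp only [pvStepA, pvFindSlotA_eq, if_neg hm]
      have hB : pvStepB (parent, sched, total) job
          = (pvCompress parent job.2.1 (pvChase parent job.2.1 (job.2.1.toNat + 1))
                (job.2.1.toNat + 1), sched, total) := by
        simp only [pvStepB, hchase, if_neg hm]
      rw [hA, hB]
      exact ih sched total _ hinv2

-- ===== VERDICT (by name: the statement is the Claim_ definition above) =====
theorem job_scheduling_with_profit_spec : Claim_equal_job_scheduling_with_profit := by
  intro jobs _
  unfold Spec_job_scheduling_with_profit job_scheduling_with_profit job_scheduling_with_profit_alt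
  have hinv0 : pvInv PySem.Dict.empty [] := by
    constructor
    · intro k; simp [PySem.Dict.get?_empty]
    · intro k v h; simp [PySem.Dict.get?_empty] at h
  obtain ⟨h1, h2, h3, _⟩ :=
    pvLoop (PySem.List.sorted jobs (fun x => x.2.2) true) [] 0 PySem.Dict.empty hinv0
  simp only [List.length_nil, Int.natCast_zero] at h1 h2 h3
  exact Prod.ext h2 (Prod.ext h3 h1)
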